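-- pv_equiv track=rewrite | github.com/Bgzdl/Multi-model-NER | utils.py | calculate_loc_accuracy
-- ===== SOURCE A (Python) =====
-- def calculate_loc_accuracy(gold_named_entity, pred_named_entity):
--     correct_predictions = 0
--     total_pred_entities = 0
--     total_gold_entities = 0
--
--     # 遍历预测的命名实体
--     for word, predicted_entity in pred_named_entity.items():
--         if predicted_entity == 'LOC':
--             total_pred_entities += 1
--         # 检查该单词是否在真实标注中且实体类型匹配
--             if word in gold_named_entity and predicted_entity == gold_named_entity[word]:
--                 correct_predictions += 1
--     for word, gold_entity in gold_named_entity.items():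
--         if gold_entity == 'LOC':
--             total_gold_entities += 1
--     return correct_predictions, total_pred_entities, total_gold_entities
-- ===== SOURCE B (Python) =====
-- def calculate_loc_accuracy(gold_named_entity, pred_named_entity):
--     g = sorted(w for w, e in gold_named_entity.items() if e == 'LOC')
--     p = sorted(w for w, e in pred_named_entity.items() if e == 'LOC')
--     correct = 0
--     i = j = 0
--     while i < len(g) and j < len(p):
--         if g[i] < p[j]:
--             i += 1
--         elif p[j] < g[i]:
--             j += 1
--         else:
--             correct += 1
--             i += 1
--             j += 1
--     return correct, len(p), len(g)
-- ===== Notes on version B (the rewrite author's own statement) =====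
-- stated objective: alternative
-- what changed: B sorts the two LOC word lists and counts the intersection with a two-pointer sorted-merge scan instead of A's per-element dict membership lookups inside the counting loop.
import Mathlib
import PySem

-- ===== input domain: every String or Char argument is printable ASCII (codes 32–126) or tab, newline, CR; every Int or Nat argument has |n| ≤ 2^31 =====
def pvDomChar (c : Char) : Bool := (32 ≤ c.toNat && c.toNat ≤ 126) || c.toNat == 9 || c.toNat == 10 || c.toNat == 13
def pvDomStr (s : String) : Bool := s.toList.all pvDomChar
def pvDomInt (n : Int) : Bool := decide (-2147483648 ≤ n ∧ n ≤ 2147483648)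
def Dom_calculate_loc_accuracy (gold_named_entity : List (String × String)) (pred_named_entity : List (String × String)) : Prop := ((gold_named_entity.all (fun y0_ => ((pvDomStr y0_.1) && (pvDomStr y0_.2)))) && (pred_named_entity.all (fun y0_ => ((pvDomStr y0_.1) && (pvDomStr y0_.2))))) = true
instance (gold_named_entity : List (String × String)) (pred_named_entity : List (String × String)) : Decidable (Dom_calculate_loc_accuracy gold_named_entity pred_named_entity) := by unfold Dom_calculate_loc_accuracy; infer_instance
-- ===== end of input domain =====

-- B sorts the two LOC word lists and counts their intersection with a two-pointer sorted-merge
-- scan instead of per-element dict membership lookups; an alternative algorithm, not claimed faster.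

-- ===== PORT A =====
-- A's first loop over pred.items(): counts LOC predictions, and among those the words whose
-- gold entry exists and equals the predicted entity ('word in gold and pred == gold[word]'
-- is exactly 'get? = some predicted_entity').
def calculate_loc_accuracy (gold_named_entity : List (String × String)) (pred_named_entity : List (String × String)) : Int × Int × Int :=
  let s : Int × Int :=
    pred_named_entity.foldl (fun (st : Int × Int) p =>
      if p.2 = "LOC" then
        let st1 : Int × Int := (st.1, st.2 + 1)
        if (PySem.Dict.mk gold_named_entity).get? p.1 = some p.2 then (st1.1 + 1, st1.2) else st1
      else st) (0, 0)
  let total_gold : Int :=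
    gold_named_entity.foldl (fun (t : Int) p => if p.2 = "LOC" then t + 1 else t) 0
  (s.1, s.2, total_gold)

-- ===== PORT B =====
-- B's while loop: two pointers i, j over the sorted lists g, p; advances the pointer of the
-- smaller head, counts a match when the heads are equal.
-- fuel is only a structural totality guard: g.length + p.length steps always suffice
def mergeCount (fuel : Nat) (g p : List String) (i j : Nat) (correct : Int) : Int :=
  match fuel with
  | 0 => correct
  | fuel + 1 =>
    if h : i < g.length ∧ j < p.length then
      if g[i] < p[j] then mergeCount fuel g p (i + 1) j correct
      else if p[j] < g[i] then mergeCount fuel g p i (j + 1) correct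
      else mergeCount fuel g p (i + 1) (j + 1) (correct + 1)
    else correct

def calculate_loc_accuracy_alt (gold_named_entity : List (String × String)) (pred_named_entity : List (String × String)) : Int × Int × Int :=
  let g : List String :=
    PySem.List.sorted (gold_named_entity.filterMap (fun q => if q.2 = "LOC" then some q.1 else none)) (fun x => x) false
  let p : List String :=
    PySem.List.sorted (pred_named_entity.filterMap (fun q => if q.2 = "LOC" then some q.1 else none)) (fun x => x) false
  (mergeCount (g.length + p.length) g p 0 0 0, (p.length : Int), (g.length : Int))

-- ===== PRECONDITION & SPEC =====
-- Pre_ excludes only association lists with duplicate keys: both arguments are Python dicts,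
-- which cannot contain a repeated key, so this is the dict-representation invariant.
def Pre_calculate_loc_accuracy (gold_named_entity : List (String × String)) (pred_named_entity : List (String × String)) : Prop :=
  (gold_named_entity.map Prod.fst).Nodup ∧ (pred_named_entity.map Prod.fst).Nodup
instance (gold_named_entity : List (String × String)) (pred_named_entity : List (String × String)) : Decidable (Pre_calculate_loc_accuracy gold_named_entity pred_named_entity) := by unfold Pre_calculate_loc_accuracy; infer_instance

def pvWitness_calculate_loc_accuracy : (List (String × String)) × (List (String × String)) :=
  ([("paris", "LOC"), ("bob", "PER")], [("paris", "LOC"), ("rome", "LOC")])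

def Spec_calculate_loc_accuracy (gold_named_entity : List (String × String)) (pred_named_entity : List (String × String)) (out : Int × Int × Int) : Prop := out = calculate_loc_accuracy_alt gold_named_entity pred_named_entity
instance (gold_named_entity : List (String × String)) (pred_named_entity : List (String × String)) (out : Int × Int × Int) : Decidable (Spec_calculate_loc_accuracy gold_named_entity pred_named_entity out) := by unfold Spec_calculate_loc_accuracy; infer_instance

-- ===== CLAIM =====
def Claim_equal_calculate_loc_accuracy : Prop := ∀ (gold_named_entity : List (String × String)) (pred_named_entity : List (String × String)), Dom_calculate_loc_accuracy gold_named_entity pred_named_entity → Pre_calculate_loc_accuracy gold_named_entity pred_named_entity → Spec_calculate_loc_accuracy gold_named_entity pred_named_entity (calculate_loc_accuracy gold_named_entity pred_named_entity)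

-- ===== LEMMAS AND PROOFS =====

-- the LOC words of an association list, in order
def locWords (l : List (String × String)) : List String :=
  l.filterMap (fun p => if p.2 = "LOC" then some p.1 else none)

lemma locWords_eq (l : List (String × String)) :
    locWords l = (l.filter (fun p => p.2 == "LOC")).map Prod.fst := by
  induction l with
  | nil => rfl
  | cons p t ih =>
    by_cases hp : p.2 = "LOC" <;>
      simp [locWords, List.filterMap_cons, List.filter_cons, hp, ih] <;>
      simp [locWords] at ih <;> exact ih

lemma locWords_subset_keys (l : List (String × String)) :
    locWords l ⊆ l.map Prod.fst := by
  rw [locWords_eq]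
  exact List.map_subset Prod.fst List.filter_sublist.subset

lemma locWords_nodup (l : List (String × String)) (h : (l.map Prod.fst).Nodup) :
    (locWords l).Nodup := by
  rw [locWords_eq]
  exact List.Nodup.sublist (List.Sublist.map Prod.fst List.filter_sublist) h

-- under unique gold keys, the first-match lookup returns "LOC" exactly on LOC words of gold
lemma get?_eq_some_LOC_iff (gold : List (String × String)) (h : (gold.map Prod.fst).Nodup)
    (w : String) :
    (PySem.Dict.mk gold).get? w = some "LOC" ↔ w ∈ locWords gold := by
  induction gold with
  | nil => simp [PySem.Dict.get?, locWords]
  | cons p t ih =>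
    simp only [List.map_cons, List.nodup_cons] at h
    rw [PySem.Dict.get?_mk_cons]
    by_cases hk : p.1 = w
    · subst hk
      simp only [beq_self_eq_true, if_pos]
      constructor
      · intro hv
        have hv' : p.2 = "LOC" := Option.some_inj.1 hv
        simp [locWords, List.filterMap_cons, hv']
      · intro hm
        by_cases he : p.2 = "LOC"
        · rw [he]
        · exfalso
          have hm' : p.1 ∈ locWords t := by
            simpa [locWords, List.filterMap_cons, he] using hm
          exact h.1 (locWords_subset_keys t hm')
    · have hbeq : (p.1 == w) = false := beq_false_of_ne hk
      rw [hbeq]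
      simp only [Bool.false_eq_true, if_false]
      rw [ih h.2]
      by_cases he : p.2 = "LOC"
      · have hhead : locWords (p :: t) = p.1 :: locWords t := by
          simp [locWords, List.filterMap_cons, he]
        rw [hhead, List.mem_cons]
        simp [show ¬ w = p.1 from fun hw => hk hw.symm]
      · have hhead : locWords (p :: t) = locWords t := by
          simp [locWords, List.filterMap_cons, he]
        rw [hhead]

-- A's first loop, characterised (state generalised)
lemma predLoop_eq (gold pred : List (String × String)) (hg : (gold.map Prod.fst).Nodup)
    (st : Int × Int) :
    pred.foldl (fun (st : Int × Int) p =>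
      if p.2 = "LOC" then
        let st1 : Int × Int := (st.1, st.2 + 1)
        if (PySem.Dict.mk gold).get? p.1 = some p.2 then (st1.1 + 1, st1.2) else st1
      else st) st
    = (st.1 + ((locWords pred).filter (fun w => (locWords gold).contains w)).length,
       st.2 + (locWords pred).length) := by
  induction pred generalizing st with
  | nil => simp [locWords]
  | cons p t ih =>
    simp only [List.foldl_cons]
    by_cases hp : p.2 = "LOC"
    · rw [if_pos hp]
      have hhead : locWords (p :: t) = p.1 :: locWords t := by
        simp [locWords, List.filterMap_cons, hp]
      have hmem := get?_eq_some_LOC_iff gold hg p.1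
      by_cases hin : p.1 ∈ locWords gold
      · have hget : (PySem.Dict.mk gold).get? p.1 = some p.2 := by
          rw [hp]; exact hmem.2 hin
        rw [if_pos hget]
        rw [ih ((st.1 + 1, st.2 + 1) : Int × Int)]
        have hc : ((locWords gold).contains p.1) = true := by
          simpa using hin
        rw [hhead]
        simp only [List.filter_cons, hc, if_pos, List.length_cons, Prod.mk.injEq]
        constructor <;> push_cast <;> ring
      · have hget : ¬ (PySem.Dict.mk gold).get? p.1 = some p.2 := by
          rw [hp]; exact fun hc => hin (hmem.1 hc)
        rw [if_neg hget]
        rw [ih ((st.1, st.2 + 1) : Int × Int)]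
        have hc : ((locWords gold).contains p.1) = false := by
          simpa using hin
        rw [hhead]
        simp only [List.filter_cons, hc, Bool.false_eq_true, if_false,
          List.length_cons, Prod.mk.injEq]
        constructor <;> push_cast <;> ring
    · rw [if_neg hp]
      rw [ih st]
      have hhead : locWords (p :: t) = locWords t := by
        simp [locWords, List.filterMap_cons, hp]
      rw [hhead]

-- A's second loop counts the LOC entries of gold
lemma goldLoop_eq (gold : List (String × String)) (t : Int) :
    gold.foldl (fun (t : Int) p => if p.2 = "LOC" then t + 1 else t) t
    = t + (locWords gold).length := by
  induction gold generalizing t with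
  | nil => simp [locWords]
  | cons p r ih =>
    simp only [List.foldl_cons]
    by_cases hp : p.2 = "LOC"
    · rw [if_pos hp, ih]
      have hhead : locWords (p :: r) = p.1 :: locWords r := by
        simp [locWords, List.filterMap_cons, hp]
      rw [hhead]
      push_cast [List.length_cons]
      ring
    · rw [if_neg hp, ih]
      have hhead : locWords (p :: r) = locWords r := by
        simp [locWords, List.filterMap_cons, hp]
      rw [hhead]

-- B's pointer loop as a plain recursion over the remaining suffixes
def mergeList : List String → List String → Int
  | [], _ => 0
  | _ :: _, [] => 0
  | x :: xs, y :: ys =>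
    if x < y then mergeList xs (y :: ys)
    else if y < x then mergeList (x :: xs) ys
    else 1 + mergeList xs ys

lemma mergeCount_eq_mergeList (g p : List String) (fuel : Nat) :
    ∀ (i j : Nat) (c : Int), g.length - i + (p.length - j) ≤ fuel →
      mergeCount fuel g p i j c = c + mergeList (g.drop i) (p.drop j) := by
  induction fuel with
  | zero =>
    intro i j c hb
    rw [mergeCount, List.drop_eq_nil_of_le (show g.length ≤ i by omega), mergeList]
    ring
  | succ f ih =>
    intro i j c hb
    rw [mergeCount]
    by_cases h : i < g.length ∧ j < p.length
    · rw [dif_pos h]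
      by_cases hlt : g[i] < p[j]
      · rw [if_pos hlt, ih (i + 1) j c (by omega),
            List.drop_eq_getElem_cons h.1, List.drop_eq_getElem_cons h.2, mergeList,
            if_pos hlt, ← List.drop_eq_getElem_cons h.2]
      · rw [if_neg hlt]
        by_cases hgt : p[j] < g[i]
        · rw [if_pos hgt, ih i (j + 1) c (by omega),
              List.drop_eq_getElem_cons h.1, List.drop_eq_getElem_cons h.2, mergeList,
              if_neg hlt, if_pos hgt, ← List.drop_eq_getElem_cons h.1]
        · rw [if_neg hgt, ih (i + 1) (j + 1) (c + 1) (by omega),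
              List.drop_eq_getElem_cons h.1, List.drop_eq_getElem_cons h.2, mergeList,
              if_neg hlt, if_neg hgt]
          ring
    · rw [dif_neg h]
      rcases Nat.lt_or_ge i g.length with hi | hi
      · have hj : p.length ≤ j := by
          by_contra hj; exact h ⟨hi, Nat.lt_of_not_le hj⟩
        rw [List.drop_eq_nil_of_le hj]
        cases g.drop i with
        | nil => simp [mergeList]
        | cons a t => simp [mergeList]
      · rw [List.drop_eq_nil_of_le hi]; simp [mergeList]

-- the merge of strictly increasing lists counts p's elements that occur in g
lemma mergeList_eq (g p : List String) (hg : g.Pairwise (· < ·)) (hp : p.Pairwise (· < ·)) :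
    mergeList g p = ((p.filter (fun w => g.contains w)).length : Int) := by
  induction g, p using mergeList.induct with
  | case1 p => simp [mergeList]
  | case2 x xs => simp [mergeList]
  | case3 x xs y ys hlt ih =>
    rw [mergeList, if_pos hlt, ih (List.Pairwise.of_cons hg) hp]
    congr 2
    apply List.filter_congr
    intro z hz
    have hyz : y ≤ z := by
      rcases List.mem_cons.1 hz with rfl | hz'
      · exact le_refl z
      · exact le_of_lt (List.rel_of_pairwise_cons hp hz')
    have hxz : x ≠ z := fun he => absurd (lt_of_lt_of_le hlt hyz) (by rw [he]; exact lt_irrefl z)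
    simp [List.contains_cons, hxz, Ne.symm hxz]
  | case4 x xs y ys hlt hgt ih =>
    rw [mergeList, if_neg hlt, if_pos hgt, ih hg (List.Pairwise.of_cons hp)]
    have hy : (x :: xs).contains y = false := by
      simp only [List.contains_eq_mem, decide_eq_false_iff_not]
      intro hmem
      rcases List.mem_cons.1 hmem with rfl | hmem'
      · exact lt_irrefl y hgt
      · exact absurd (lt_trans hgt (List.rel_of_pairwise_cons hg hmem')) (lt_irrefl y)
    rw [List.filter_cons, hy]
    simp
  | case5 x xs y ys hlt hgt ih =>
    have hxy : x = y := le_antisymm (le_of_not_gt hgt) (le_of_not_gt hlt)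
    subst hxy
    rw [mergeList, if_neg hlt, if_neg hgt,
        ih (List.Pairwise.of_cons hg) (List.Pairwise.of_cons hp)]
    have hy : (x :: xs).contains x = true := by simp
    rw [List.filter_cons, hy]
    have hcong : ys.filter (fun w => (x :: xs).contains w) = ys.filter (fun w => xs.contains w) := by
      apply List.filter_congr
      intro z hz
      have hxz : x ≠ z := ne_of_lt (List.rel_of_pairwise_cons hp hz)
      simp [List.contains_cons, hxz, Ne.symm hxz]
    rw [hcong]
    simp only [if_true, List.length_cons]
    push_cast
    ring

-- strict sortedness of the sorted nodup LOC lists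
lemma sorted_strict (l : List String) (h : l.Nodup) :
    (PySem.List.sorted l (fun x => x) false).Pairwise (· < ·) := by
  have hle := PySem.List.sorted_pairwise (xs := l) (key := fun x => x) (κ := String)
  have hnd : (PySem.List.sorted l (fun x => x) false).Nodup :=
    (PySem.List.sorted_perm l (fun x => x) false).nodup_iff.2 h
  exact hle.imp₂ (fun a b hab hne => lt_of_le_of_ne hab hne) hnd

-- ===== VERDICT =====
theorem calculate_loc_accuracy_spec : Claim_equal_calculate_loc_accuracy := by
  intro gold pred _ hpre
  obtain ⟨hg, hp⟩ := hpre
  show calculate_loc_accuracy gold pred = calculate_loc_accuracy_alt gold pred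
  simp only [calculate_loc_accuracy, calculate_loc_accuracy_alt]
  set gs := PySem.List.sorted (gold.filterMap (fun q => if q.2 = "LOC" then some q.1 else none)) (fun x => x) false with hgs
  set ps := PySem.List.sorted (pred.filterMap (fun q => if q.2 = "LOC" then some q.1 else none)) (fun x => x) false with hps
  have hgperm : gs.Perm (locWords gold) := PySem.List.sorted_perm _ _ _
  have hpperm : ps.Perm (locWords pred) := PySem.List.sorted_perm _ _ _
  have hgsorted : gs.Pairwise (· < ·) := sorted_strict _ (locWords_nodup gold hg)
  have hpsorted : ps.Pairwise (· < ·) := sorted_strict _ (locWords_nodup pred hp)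
  rw [predLoop_eq gold pred hg (0, 0), goldLoop_eq gold 0,
      mergeCount_eq_mergeList gs ps (gs.length + ps.length) 0 0 0 (by omega)]
  simp only [List.drop_zero, zero_add]
  rw [mergeList_eq gs ps hgsorted hpsorted]
  have hfilter : (ps.filter (fun w => gs.contains w)).length
      = ((locWords pred).filter (fun w => (locWords gold).contains w)).length := by
    rw [show (fun w => gs.contains w) = (fun w => (locWords gold).contains w) from
      funext fun w => by simp [List.contains_eq_mem, hgperm.mem_iff],
      ← List.countP_eq_length_filter, ← List.countP_eq_length_filter]
    exact hpperm.countP_eq _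
  rw [hfilter, hgperm.length_eq, hpperm.length_eq]
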